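-- pv_equiv track=rewrite | github.com/eeshanl/Coding-Problems | CodingPrep2024/blah.py | is_valid_combination
-- ===== SOURCE A (Python) =====
-- def is_valid_combination(blocks, word, used_indices):
--         if not word:
--             return True
--
--         first_letter = word[0]
--
--         for i, block in enumerate(blocks):
--             if i not in used_indices and first_letter in block:
--                 used_indices.add(i)
--                 if is_valid_combination(blocks, word[1:], used_indices):
--                     return True
--                 used_indices.remove(i)
--
--         return False
-- ===== SOURCE B (Python) =====
-- def is_valid_combination(blocks, word, used_indices):
--     # Equivalence is about the RETURN value only: A mutates used_indices (leaves
--     # the chosen indices added on success); B never mutates it.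
--     available = [block for i, block in enumerate(blocks) if i not in used_indices]
--
--     def solve(avail, letters):
--         # dual backtracking: recurse over the remaining BLOCKS; each block is
--         # either skipped or consumes one still-needed letter
--         if not letters:
--             return True
--         if not avail:
--             return False
--         b, rest = avail[0], avail[1:]
--         if solve(rest, letters):
--             return True
--         for k, ch in enumerate(letters):
--             if ch in b and solve(rest, letters[:k] + letters[k + 1:]):
--                 return True
--         return False
--
--     return solve(available, list(word))
-- ===== Notes on version B (the rewrite author's own statement) =====
-- stated objective: alternative
-- what changed: B replaces A's letter-major backtracking over a mutable used-index set (pick a block for each successive letter) with a dual block-major search: it first materialises the list of available blocks, then recurses over that list, each block being either skipped or consuming one still-needed letter; equivalence is about the return value only since A mutates used_indices on success.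
import Mathlib
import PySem

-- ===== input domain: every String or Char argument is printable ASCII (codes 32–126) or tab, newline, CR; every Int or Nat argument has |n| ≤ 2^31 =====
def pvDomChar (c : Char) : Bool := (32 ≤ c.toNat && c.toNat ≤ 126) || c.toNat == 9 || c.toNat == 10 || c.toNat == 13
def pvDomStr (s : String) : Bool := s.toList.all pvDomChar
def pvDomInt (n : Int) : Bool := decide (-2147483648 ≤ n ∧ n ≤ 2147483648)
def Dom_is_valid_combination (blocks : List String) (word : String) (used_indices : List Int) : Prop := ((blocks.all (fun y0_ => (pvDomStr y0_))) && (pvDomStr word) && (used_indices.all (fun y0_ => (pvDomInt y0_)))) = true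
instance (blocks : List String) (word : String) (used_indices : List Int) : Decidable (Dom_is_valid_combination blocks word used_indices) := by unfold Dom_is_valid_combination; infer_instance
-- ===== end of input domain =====

-- B replaces A's letter-major backtracking (mutable used-index set) with a dual block-major
-- search over the pre-filtered list of available blocks (skip a block or spend it on one
-- still-needed letter); same results, similar cost ("alternative"). A mutates used_indices
-- in place (the matched indices stay added on success); the equivalence proved here is
-- about the RETURN value only — B never mutates its argument.

-- ===== PORT A =====
-- A's recursion on the word's characters; the Python set used_indices is threaded
-- functionally (add-on-recurse = Python's add + remove backtrack, exact for a set);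
-- 'first_letter in block' with a 1-char needle is char membership; the for-loop with
-- early 'return True' / final 'return False' is .any over enumerate(blocks).
def isValidGo (blocks : List String) : List Char → PySem.Set Int → Bool
  | [], _ => true
  | c :: rest, used =>
      (PySem.List.enumerate blocks 0).any (fun ib =>
        !(PySem.Set.contains used ib.1) && ib.2.toList.contains c &&
          isValidGo blocks rest (PySem.Set.add used ib.1))

def is_valid_combination (blocks : List String) (word : String) (used_indices : List Int) : Bool :=
  isValidGo blocks word.toList (PySem.Set.ofList used_indices)

-- ===== PORT B =====
-- Source B's solve: recursion over the remaining available blocks; a block is skipped or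
-- consumes one still-needed letter (letters[:k]+letters[k+1:] = eraseIdx k; enumerate
-- indices are ≥ 0, so .toNat is exact).
def solveGo : List String → List Char → Bool
  | _, [] => true
  | [], _ :: _ => false
  | b :: rest, c :: ls =>
      solveGo rest (c :: ls) ||
      (PySem.List.enumerate (c :: ls) 0).any (fun kc =>
        b.toList.contains kc.2 && solveGo rest ((c :: ls).eraseIdx kc.1.toNat))

def is_valid_combination_alt (blocks : List String) (word : String) (used_indices : List Int) : Bool :=
  solveGo
    (((PySem.List.enumerate blocks 0).filter
        (fun ib => !(PySem.Set.contains (PySem.Set.ofList used_indices) ib.1))).map Prod.snd)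
    word.toList

-- ===== PRECONDITION & SPEC =====
def Spec_is_valid_combination (blocks : List String) (word : String) (used_indices : List Int) (out : Bool) : Prop := out = is_valid_combination_alt blocks word used_indices
instance (blocks : List String) (word : String) (used_indices : List Int) (out : Bool) : Decidable (Spec_is_valid_combination blocks word used_indices out) := by unfold Spec_is_valid_combination; infer_instance

-- ===== CLAIM (what is proved, stated in full; the proofs are below) =====
def Claim_equal_is_valid_combination : Prop := ∀ (blocks : List String) (word : String) (used_indices : List Int), Dom_is_valid_combination blocks word used_indices → Spec_is_valid_combination blocks word used_indices (is_valid_combination blocks word used_indices)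

-- ===== LEMMAS AND PROOFS =====

-- the list of blocks whose index is not in `used` (B's `available`)
def pvAvail (blocks : List String) (used : PySem.Set Int) : List String :=
  ((PySem.List.enumerate blocks 0).filter
      (fun ib => !(PySem.Set.contains used ib.1))).map Prod.snd

-- common specification: the letters `ls` can be matched injectively to blocks of `bs`
def Matches (bs : List String) (ls : List Char) : Prop :=
  ∃ m : Multiset (Char × String),
    m.map Prod.fst = (ls : Multiset Char) ∧
    m.map Prod.snd ≤ (bs : Multiset String) ∧
    ∀ p ∈ m, p.1 ∈ p.2.toList

lemma matches_nil (bs : List String) : Matches bs [] :=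
  ⟨0, by simp, by simp, by simp⟩

lemma contains_add_ne (s : PySem.Set Int) (x y : Int) (h : y ≠ x) :
    PySem.Set.contains (PySem.Set.add s x) y = PySem.Set.contains s y := by
  simp [PySem.Set.mem_add, h]

lemma avail_add_perm (l1 l2 : List String) (b : String) (used : PySem.Set Int)
    (hc : PySem.Set.contains used (l1.length : Int) = false) :
    (pvAvail (l1 ++ b :: l2) used).Perm
      (b :: pvAvail (l1 ++ b :: l2) (PySem.Set.add used (l1.length : Int))) := by
  have hne1 : ∀ x ∈ PySem.List.enumerate l1 0, x.1 ≠ (l1.length : Int) := by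
    intro x hx
    rw [PySem.List.mem_enumerate_iff] at hx
    obtain ⟨j, hj, rfl⟩ := hx
    simp only []
    omega
  have hne2 : ∀ x ∈ PySem.List.enumerate l2 (0 + (l1.length : Int) + 1),
      x.1 ≠ (l1.length : Int) := by
    intro x hx
    rw [PySem.List.mem_enumerate_iff] at hx
    obtain ⟨j, hj, rfl⟩ := hx
    simp only []
    omega
  have hQ1 : (PySem.List.enumerate l1 0).filter
        (fun ib => !(PySem.Set.contains (PySem.Set.add used (l1.length : Int)) ib.1))
      = (PySem.List.enumerate l1 0).filter
        (fun ib => !(PySem.Set.contains used ib.1)) :=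
    List.filter_congr (fun x hx => by rw [contains_add_ne _ _ _ (hne1 x hx)])
  have hQ2 : (PySem.List.enumerate l2 (0 + (l1.length : Int) + 1)).filter
        (fun ib => !(PySem.Set.contains (PySem.Set.add used (l1.length : Int)) ib.1))
      = (PySem.List.enumerate l2 (0 + (l1.length : Int) + 1)).filter
        (fun ib => !(PySem.Set.contains used ib.1)) :=
    List.filter_congr (fun x hx => by rw [contains_add_ne _ _ _ (hne2 x hx)])
  have hkeep : (!(PySem.Set.contains used (0 + (l1.length : Int)))) = true := by
    simpa using hc
  have hdrop : (!(PySem.Set.contains (PySem.Set.add used (l1.length : Int))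
      (0 + (l1.length : Int)))) = false := by
    simp [PySem.Set.mem_add]
  unfold pvAvail
  rw [PySem.List.enumerate_append, PySem.List.enumerate_cons, List.filter_append,
    List.filter_append, List.filter_cons, List.filter_cons, hQ1, hQ2, hkeep, hdrop]
  simp only [if_true, List.map_append, List.map_cons]
  exact List.perm_middle

lemma avail_perm (blocks : List String) (used : PySem.Set Int) (k : Nat)
    (hk : k < blocks.length) (hc : PySem.Set.contains used (k : Int) = false) :
    (pvAvail blocks used).Perm
      (blocks[k] :: pvAvail blocks (PySem.Set.add used (k : Int))) := by
  have hlen : (blocks.take k).length = k := by simp [hk.le]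
  have hsplit : blocks.take k ++ blocks[k] :: blocks.drop (k + 1) = blocks := by
    rw [← List.drop_eq_getElem_cons hk, List.take_append_drop]
  have h := avail_add_perm (blocks.take k) (blocks.drop (k + 1)) blocks[k] used
    (by rw [hlen]; exact hc)
  rw [hlen, hsplit] at h
  exact h

lemma goA_iff (blocks : List String) : ∀ (ls : List Char) (used : PySem.Set Int),
    isValidGo blocks ls used = true ↔ Matches (pvAvail blocks used) ls := by
  intro ls
  induction ls with
  | nil =>
    intro used
    simp [isValidGo, matches_nil]
  | cons c rest ih =>
    intro used
    simp only [isValidGo, List.any_eq_true, Bool.and_eq_true, Bool.not_eq_true']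
    constructor
    · rintro ⟨ib, hib, ⟨hcont, hmemb⟩, hrec⟩
      rw [PySem.List.mem_enumerate_iff] at hib
      obtain ⟨j, hj, rfl⟩ := hib
      simp only [zero_add] at hcont hmemb hrec
      obtain ⟨m, hfst, hsnd, hmem⟩ := (ih _).mp hrec
      have hperm := avail_perm blocks used j hj hcont
      refine ⟨(c, blocks[j]) ::ₘ m, ?_, ?_, ?_⟩
      · simp [hfst]
      · have hcoe : (pvAvail blocks used : Multiset String)
            = blocks[j] ::ₘ (pvAvail blocks (PySem.Set.add used (j : Int)) : Multiset String) := by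
          rw [Multiset.coe_eq_coe.mpr hperm, ← Multiset.cons_coe]
        rw [Multiset.map_cons, hcoe]
        exact Multiset.cons_le_cons _ hsnd
      · intro p hp
        rcases Multiset.mem_cons.mp hp with h | h
        · subst h; simpa [List.contains_iff_mem] using hmemb
        · exact hmem p h
    · rintro ⟨m, hfst, hsnd, hmem⟩
      have hc_mem : c ∈ m.map Prod.fst := by
        rw [hfst, ← Multiset.cons_coe]; exact Multiset.mem_cons_self _ _
      obtain ⟨p, hp, hpc⟩ := Multiset.mem_map.mp hc_mem
      obtain ⟨m', rfl⟩ := Multiset.exists_cons_of_mem hp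
      have hb_mem : p.2 ∈ (pvAvail blocks used : Multiset String) :=
        Multiset.mem_of_le hsnd (by simp)
      rw [Multiset.mem_coe] at hb_mem
      obtain ⟨ib, hibf, hibsnd⟩ := List.mem_map.mp hb_mem
      have hfilt := List.mem_filter.mp hibf
      obtain ⟨j, hj, hibeq⟩ := (PySem.List.mem_enumerate_iff _ _ _).mp hfilt.1
      have hpred := hfilt.2
      subst hibeq
      simp only [zero_add, Bool.not_eq_eq_eq_not, Bool.not_true] at hpred
      simp only [] at hibsnd
      have hperm := avail_perm blocks used j hj hpred
      have hcoe : (pvAvail blocks used : Multiset String)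
          = blocks[j] ::ₘ (pvAvail blocks (PySem.Set.add used (j : Int)) : Multiset String) := by
        rw [Multiset.coe_eq_coe.mpr hperm, ← Multiset.cons_coe]
      refine ⟨(0 + (j : Int), blocks[j]), ?_, ⟨?_, ?_⟩, ?_⟩
      · rw [PySem.List.mem_enumerate_iff]; exact ⟨j, hj, rfl⟩
      · simpa using hpred
      · have := hmem p (Multiset.mem_cons_self _ _)
        rw [hpc, ← hibsnd] at this
        simpa [List.contains_iff_mem] using this
      · simp only [zero_add]
        refine (ih _).mpr ⟨m', ?_, ?_, fun q hq => hmem q (Multiset.mem_cons_of_mem hq)⟩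
        · rw [Multiset.map_cons, hpc, ← Multiset.cons_coe] at hfst
          exact (Multiset.cons_inj_right _).mp hfst
        · rw [Multiset.map_cons, ← hibsnd, hcoe] at hsnd
          exact (Multiset.cons_le_cons_iff _).mp hsnd

lemma cons_eraseIdx_perm (l : List Char) (j : Nat) (hj : j < l.length) :
    (l[j] :: l.eraseIdx j).Perm l := by
  rw [List.eraseIdx_eq_take_drop_succ]
  have h1 : (l[j] :: (l.take j ++ l.drop (j + 1))).Perm
      (l.take j ++ l[j] :: l.drop (j + 1)) := List.perm_middle.symm
  rw [← List.drop_eq_getElem_cons hj, List.take_append_drop] at h1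
  exact h1

lemma matches_nil_right (ls : List Char) (h : Matches [] ls) : ls = [] := by
  obtain ⟨m, hfst, hsnd, -⟩ := h
  have : m.map Prod.snd = 0 := Multiset.le_zero.mp (by simpa using hsnd)
  have hm : m = 0 := by simpa using this
  subst hm
  simpa using hfst.symm

lemma solveGo_iff (bs : List String) : ∀ (ls : List Char),
    solveGo bs ls = true ↔ Matches bs ls := by
  induction bs with
  | nil =>
    intro ls
    cases ls with
    | nil => simp [solveGo, matches_nil]
    | cons c t =>
      simp only [solveGo]
      constructor
      · intro h; exact absurd h (by simp)
      · intro h; exact absurd (matches_nil_right _ h) (List.cons_ne_nil c t)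
  | cons b rest ih =>
    intro ls
    cases ls with
    | nil => simp [solveGo, matches_nil]
    | cons c t =>
      simp only [solveGo, Bool.or_eq_true, List.any_eq_true, Bool.and_eq_true]
      constructor
      · rintro (h | ⟨kc, hkc, hmemb, hrec⟩)
        · obtain ⟨m, hfst, hsnd, hmem⟩ := (ih _).mp h
          exact ⟨m, hfst, le_trans hsnd (by
            rw [← Multiset.cons_coe]; exact Multiset.le_cons_self _ _), hmem⟩
        · rw [PySem.List.mem_enumerate_iff] at hkc
          obtain ⟨j, hj, rfl⟩ := hkc
          simp only [zero_add, Int.toNat_natCast] at hmemb hrec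
          obtain ⟨m', hfst, hsnd, hmem⟩ := (ih _).mp hrec
          refine ⟨((c :: t)[j], b) ::ₘ m', ?_, ?_, ?_⟩
          · rw [Multiset.map_cons, hfst, ← Multiset.coe_eq_coe.mpr (cons_eraseIdx_perm (c :: t) j hj),
              Multiset.cons_coe]
          · rw [Multiset.map_cons, ← Multiset.cons_coe]
            exact Multiset.cons_le_cons _ hsnd
          · intro q hq
            rcases Multiset.mem_cons.mp hq with h' | h'
            · subst h'; simpa [List.contains_iff_mem] using hmemb
            · exact hmem q h'
      · rintro ⟨m, hfst, hsnd, hmem⟩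
        by_cases hbm : b ∈ m.map Prod.snd
        · right
          obtain ⟨p, hp, hpb⟩ := Multiset.mem_map.mp hbm
          obtain ⟨m', rfl⟩ := Multiset.exists_cons_of_mem hp
          have hp1 : p.1 ∈ (c :: t) := by
            have : p.1 ∈ m'.map Prod.fst + {p.1} := by simp
            have h1 : p.1 ∈ ((p ::ₘ m').map Prod.fst) := by simp
            rw [hfst] at h1
            exact Multiset.mem_coe.mp h1
          have hj : (c :: t).idxOf p.1 < (c :: t).length := List.idxOf_lt_length_of_mem hp1
          have hget : (c :: t)[(c :: t).idxOf p.1] = p.1 := List.getElem_idxOf hj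
          refine ⟨(0 + ((c :: t).idxOf p.1 : Int), (c :: t)[(c :: t).idxOf p.1]), ?_, ?_, ?_⟩
          · rw [PySem.List.mem_enumerate_iff]; exact ⟨_, hj, rfl⟩
          · have := hmem p (Multiset.mem_cons_self _ _)
            rw [← hpb]
            simp only [hget]
            simpa [List.contains_iff_mem] using this
          · simp only [zero_add, Int.toNat_natCast]
            refine (ih _).mpr ⟨m', ?_, ?_, fun q hq => hmem q (Multiset.mem_cons_of_mem hq)⟩
            · have herase : (c :: t).eraseIdx ((c :: t).idxOf p.1) = (c :: t).erase p.1 :=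
                (List.erase_eq_eraseIdx_of_idxOf rfl).symm
              rw [herase, ← Multiset.coe_erase, ← hfst, Multiset.map_cons,
                Multiset.erase_cons_head]
            · rw [Multiset.map_cons, hpb, ← Multiset.cons_coe] at hsnd
              exact (Multiset.cons_le_cons_iff _).mp hsnd
        · left
          refine (ih _).mpr ⟨m, hfst, ?_, hmem⟩
          rw [← Multiset.cons_coe] at hsnd
          exact (Multiset.le_cons_of_notMem hbm).mp hsnd

-- ===== VERDICT (by name: the statement is the Claim_ definition above) =====
theorem is_valid_combination_spec : Claim_equal_is_valid_combination := by
  intro blocks word used_indices _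
  unfold Spec_is_valid_combination
  have h : is_valid_combination blocks word used_indices = true
      ↔ is_valid_combination_alt blocks word used_indices = true := by
    rw [is_valid_combination, is_valid_combination_alt]
    exact (goA_iff blocks word.toList (PySem.Set.ofList used_indices)).trans
      (solveGo_iff (pvAvail blocks (PySem.Set.ofList used_indices)) word.toList).symm
  exact Bool.coe_iff_coe.mp h
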